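-- pv_equiv track=rewrite | github.com/h-escoffier/AoC | day5.py | is_valid_ticket_advanced_2
-- ===== SOURCE A (Python) =====
-- def get_indices(lst, value):
--     indices = [i for i, x in enumerate(lst) if x == value]
--     return indices
--
-- def get_values(lst, indices):
--     values = [lst[i] for i in indices]
--     return values
--
-- def is_valid_ticket_advanced_2(rules_before, rules_after, update):
--     i = 0
--     for elm in update:
--         if len(update) == i + 1:
--             return True, update
--         indices = get_indices(rules_after, elm)
--         values = get_values(rules_before, indices)
--         intersection = list(set(values) & set(update[i:]))
--         if len(intersection) != 0:
--             return False, update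
--         i += 1
-- ===== SOURCE B (Python) =====
-- def is_valid_ticket_advanced_2(rules_before, rules_after, update):
--     if not update:
--         return None
--     before = {}
--     for b, a in zip(rules_before, rules_after):
--         before.setdefault(a, set()).add(b)
--     suffix = {update[-1]}
--     for elm in reversed(update[:-1]):
--         suffix.add(elm)
--         if not before.get(elm, set()).isdisjoint(suffix):
--             return False, update
--     return True, update
-- ===== Notes on version B (the rewrite author's own statement) =====
-- stated objective: faster
-- what changed: B precomputes a dict mapping each value to the set of values that must come before it, then makes one backward pass over the update maintaining a growing suffix set, instead of A's per-element rescans of both rule lists and rebuilding set(update[i:]) at every position.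
-- outside the precondition, e.g. on is_valid_ticket_advanced_2([1], [5, 1], [5, 1, 9]): A returns (False, [5, 1, 9]), B returns (False, [5, 1, 9])
import Mathlib
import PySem

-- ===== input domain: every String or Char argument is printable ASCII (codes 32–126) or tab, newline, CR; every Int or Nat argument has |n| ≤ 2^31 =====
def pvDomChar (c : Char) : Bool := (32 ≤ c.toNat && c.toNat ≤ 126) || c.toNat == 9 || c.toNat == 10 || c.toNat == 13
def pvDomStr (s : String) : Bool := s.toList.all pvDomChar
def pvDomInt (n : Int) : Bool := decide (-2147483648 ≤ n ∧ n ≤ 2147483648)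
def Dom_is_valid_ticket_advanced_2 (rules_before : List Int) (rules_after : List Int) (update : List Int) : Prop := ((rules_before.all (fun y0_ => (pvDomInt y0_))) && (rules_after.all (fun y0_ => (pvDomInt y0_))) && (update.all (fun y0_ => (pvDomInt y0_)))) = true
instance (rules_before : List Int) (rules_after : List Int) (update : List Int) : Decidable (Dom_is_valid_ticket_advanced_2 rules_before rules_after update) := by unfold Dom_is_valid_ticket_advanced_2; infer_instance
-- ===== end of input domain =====

-- B replaces A's per-element rule-list rescans and repeated set(update[i:]) rebuilds by a precomputed
-- value -> before-set dict and one backward pass with a growing suffix set (faster).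


-- ===== PORT A =====
def get_indices (lst : List Int) (value : Int) : List Int :=
  ((PySem.List.enumerate lst).filter (fun p => p.2 == value)).map (fun p => p.1)

-- the comprehension [lst[i] for i in indices]; none = IndexError
def get_values (lst : List Int) (indices : List Int) : Option (List Int) :=
  indices.mapM (fun i => PySem.List.pyGet? lst i)

-- the 'for elm in update' loop of A, with the running counter i
def pvGoA (rules_before : List Int) (rules_after : List Int) (update : List Int) :
    Int → List Int → Option (Bool × List Int)
  | _, [] => none          -- loop fell through: Python returns None
  | i, elm :: rest =>
    if (update.length : Int) = i + 1 then some (true, update)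
    else
      match get_values rules_before (get_indices rules_after elm) with
      | none => none       -- IndexError; these inputs are outside Pre_
      | some values =>
        let intersection : List Int :=
          PySem.Set.inter (PySem.Set.ofList values)
            (PySem.Set.ofList (PySem.List.slice update (some i) none))
        if intersection.length ≠ 0 then some (false, update)
        else pvGoA rules_before rules_after update (i + 1) rest

def is_valid_ticket_advanced_2 (rules_before : List Int) (rules_after : List Int) (update : List Int) : Option (Bool × List Int) :=
  pvGoA rules_before rules_after update 0 update

-- ===== PORT B =====
-- before.setdefault(a, set()).add(b) over zip(rules_before, rules_after)
def pvBefore (rules_before : List Int) (rules_after : List Int) : PySem.Dict Int (PySem.Set Int) :=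
  (rules_before.zip rules_after).foldl
    (fun d p => d.modify p.2 PySem.Set.empty (fun s => s.add p.1)) PySem.Dict.empty

-- the 'for elm in reversed(update[:-1])' loop of B, with the growing suffix set
def pvGoB (before : PySem.Dict Int (PySem.Set Int)) (update : List Int) :
    PySem.Set Int → List Int → Option (Bool × List Int)
  | _, [] => some (true, update)
  | suffix, elm :: rest =>
    let suffix' := suffix.add elm
    if (before.getD elm PySem.Set.empty).isdisjoint suffix' then
      pvGoB before update suffix' rest
    else some (false, update)

def is_valid_ticket_advanced_2_alt (rules_before : List Int) (rules_after : List Int) (update : List Int) : Option (Bool × List Int) :=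
  match update with
  | [] => none
  | _ :: _ =>
    pvGoB (pvBefore rules_before rules_after) update
      (PySem.Set.ofList [PySem.List.pyGetD update (-1) 0])
      update.dropLast.reverse

-- ===== PRECONDITION & SPEC =====
-- Pre_ excludes inputs where some non-last element of update occurs in rules_after at an index
-- ≥ len(rules_before): on those A raises IndexError in get_values, except when an earlier rule
-- violation makes A return (False, update) first — there B returns the same value (see cites).
def Pre_is_valid_ticket_advanced_2 (rules_before : List Int) (rules_after : List Int) (update : List Int) : Prop :=
  ∀ x ∈ rules_after.drop rules_before.length, x ∉ update.dropLast
instance (rules_before : List Int) (rules_after : List Int) (update : List Int) : Decidable (Pre_is_valid_ticket_advanced_2 rules_before rules_after update) := by unfold Pre_is_valid_ticket_advanced_2; infer_instance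

def pvWitness_is_valid_ticket_advanced_2 : List Int × List Int × List Int := ([47, 75], [53, 47], [75, 47, 53])

def Spec_is_valid_ticket_advanced_2 (rules_before : List Int) (rules_after : List Int) (update : List Int) (out : Option (Bool × List Int)) : Prop := out = is_valid_ticket_advanced_2_alt rules_before rules_after update
instance (rules_before : List Int) (rules_after : List Int) (update : List Int) (out : Option (Bool × List Int)) : Decidable (Spec_is_valid_ticket_advanced_2 rules_before rules_after update out) := by unfold Spec_is_valid_ticket_advanced_2; infer_instance

-- ===== CLAIM (what is proved, stated in full; the proofs are below) =====
def Claim_equal_is_valid_ticket_advanced_2 : Prop := ∀ (rules_before : List Int) (rules_after : List Int) (update : List Int), Dom_is_valid_ticket_advanced_2 rules_before rules_after update → Pre_is_valid_ticket_advanced_2 rules_before rules_after update → Spec_is_valid_ticket_advanced_2 rules_before rules_after update (is_valid_ticket_advanced_2 rules_before rules_after update)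

-- ===== LEMMAS AND PROOFS =====

-- 'there is a rule (b, elm) with b occurring in suf' — the violation test both programs decide
def pvViolB (rules_before rules_after : List Int) (elm : Int) (suf : List Int) : Bool :=
  (rules_before.zip rules_after).any (fun p => p.2 == elm && suf.contains p.1)

-- 'some non-last position of this suffix is violated' (suffix-structured, as A scans)
def pvHVb (rules_before rules_after : List Int) : List Int → Bool
  | [] => false
  | [_] => false
  | elm :: rest => pvViolB rules_before rules_after elm (elm :: rest) || pvHVb rules_before rules_after rest

theorem pvViolB_iff (rb ra : List Int) (elm : Int) (suf : List Int) :
    pvViolB rb ra elm suf = true ↔ ∃ b, (b, elm) ∈ rb.zip ra ∧ b ∈ suf := by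
  simp only [pvViolB, List.any_eq_true, Bool.and_eq_true, beq_iff_eq, List.contains_iff_mem]
  constructor
  · rintro ⟨p, hp, h2, h1⟩; exact ⟨p.1, by rwa [show (p.1, elm) = p from by rw [← h2]], h1⟩
  · rintro ⟨b, hb, hs⟩; exact ⟨(b, elm), hb, rfl, hs⟩

theorem pvHVb_cons (rb ra : List Int) (elm : Int) (rest : List Int) (h : rest ≠ []) :
    pvHVb rb ra (elm :: rest) = (pvViolB rb ra elm (elm :: rest) || pvHVb rb ra rest) := by
  cases rest with
  | nil => exact absurd rfl h
  | cons x xs => rfl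

theorem mem_zip_iff (rb ra : List Int) (b elm : Int) :
    (b, elm) ∈ rb.zip ra ↔ ∃ k, ∃ (h₁ : k < rb.length), ∃ (h₂ : k < ra.length), rb[k] = b ∧ ra[k] = elm := by
  rw [List.mem_iff_getElem]
  constructor
  · rintro ⟨k, hk, hget⟩
    have hlen : k < min rb.length ra.length := by rw [← List.length_zip]; exact hk
    refine ⟨k, by omega, by omega, ?_, ?_⟩ <;>
      · have := List.getElem_zip (l := rb) (l' := ra) (i := k) (h := hk)
        rw [hget] at this
        simp_all [Prod.ext_iff]
  · rintro ⟨k, h₁, h₂, hb, helm⟩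
    refine ⟨k, by rw [List.length_zip]; omega, ?_⟩
    rw [List.getElem_zip, hb, helm]

theorem mem_get_indices (ra : List Int) (elm : Int) (i : Int) :
    i ∈ get_indices ra elm ↔ ∃ k : Nat, ∃ (h : k < ra.length), i = (k : Int) ∧ ra[k] = elm := by
  simp only [get_indices, List.mem_map, List.mem_filter, PySem.List.mem_enumerate_iff, beq_iff_eq]
  constructor
  · rintro ⟨p, ⟨⟨k, hk, hp⟩, helm⟩, hi⟩
    subst hp
    exact ⟨k, hk, by simpa using hi.symm, by simpa using helm⟩
  · rintro ⟨k, hk, hi, helm⟩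
    exact ⟨((k : Int), ra[k]), ⟨⟨k, hk, by simp⟩, helm⟩, hi.symm⟩

theorem mapM_pyGet?_spec (rb : List Int) :
    ∀ idxs : List Int, (∀ i ∈ idxs, ∃ v, PySem.List.pyGet? rb i = some v) →
      ∃ vs, idxs.mapM (fun i => PySem.List.pyGet? rb i) = some vs ∧
        ∀ b, b ∈ vs ↔ ∃ i ∈ idxs, PySem.List.pyGet? rb i = some b := by
  intro idxs
  induction idxs with
  | nil => intro _; exact ⟨[], by simp, by simp⟩
  | cons i idxs ih =>
    intro h
    obtain ⟨v, hv⟩ := h i (List.mem_cons_self ..)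
    obtain ⟨vs, hvs, hmem⟩ := ih (fun j hj => h j (List.mem_cons_of_mem _ hj))
    refine ⟨v :: vs, by simp [List.mapM_cons, hv, hvs], ?_⟩
    intro b
    simp only [List.mem_cons, hmem]
    constructor
    · rintro (rfl | ⟨j, hj, hjb⟩)
      · exact ⟨i, Or.inl rfl, hv⟩
      · exact ⟨j, Or.inr hj, hjb⟩
    · rintro ⟨j, hj, hjb⟩
      rcases hj with rfl | hj
      · left; rw [hv] at hjb; exact (Option.some_inj.1 hjb).symm
      · right; exact ⟨j, hj, hjb⟩

theorem get_values_spec (rb ra : List Int) (elm : Int)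
    (hbound : ∀ k, (h : k < ra.length) → ra[k] = elm → k < rb.length) :
    ∃ vs, get_values rb (get_indices ra elm) = some vs ∧
      ∀ b, b ∈ vs ↔ (b, elm) ∈ rb.zip ra := by
  have side : ∀ i ∈ get_indices ra elm, ∃ v, PySem.List.pyGet? rb i = some v := by
    rintro i hi
    obtain ⟨k, hk, rfl, helm⟩ := (mem_get_indices ra elm i).1 hi
    have hkb : k < rb.length := hbound k hk helm
    exact ⟨rb[k], by rw [PySem.List.pyGet?_natCast, List.getElem?_eq_getElem hkb]⟩
  obtain ⟨vs, hsome, hmem⟩ := mapM_pyGet?_spec rb (get_indices ra elm) side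
  refine ⟨vs, hsome, fun b => ?_⟩
  rw [hmem b, mem_zip_iff]
  constructor
  · rintro ⟨i, hi, hget⟩
    obtain ⟨k, hk, rfl, helm⟩ := (mem_get_indices ra elm i).1 hi
    have hkb : k < rb.length := hbound k hk helm
    rw [PySem.List.pyGet?_natCast, List.getElem?_eq_getElem hkb] at hget
    exact ⟨k, hkb, hk, Option.some_inj.1 hget, helm⟩
  · rintro ⟨k, h₁, h₂, hb, helm⟩
    refine ⟨(k : Int), (mem_get_indices ra elm _).2 ⟨k, h₂, rfl, helm⟩, ?_⟩
    rw [PySem.List.pyGet?_natCast, List.getElem?_eq_getElem h₁]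
    exact congrArg some hb

theorem goA_spec (rb ra update : List Int) (hpre : Pre_is_valid_ticket_advanced_2 rb ra update) :
    ∀ rest k, update.drop k = rest → rest ≠ [] →
      pvGoA rb ra update (k : Int) rest = some (!pvHVb rb ra rest, update) := by
  intro rest
  induction rest with
  | nil => intro k _ h; exact absurd rfl h
  | cons elm rest ih =>
    intro k hdrop _
    have hk : k < update.length := by
      by_contra h
      rw [List.drop_eq_nil_of_le (by omega)] at hdrop
      exact List.cons_ne_nil _ _ hdrop.symm
    have hlen : update.length = k + 1 + rest.length := by
      have := congrArg List.length hdrop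
      simp [List.length_drop] at this
      omega
    cases rest with
    | nil =>
      have hcond : (update.length : Int) = (k : Int) + 1 := by
        rw [hlen]; push_cast; simp
      simp only [pvGoA, hcond, pvHVb]
      rfl
    | cons x rest' =>
      have hcond : ¬ ((update.length : Int) = (k : Int) + 1) := by
        rw [hlen]; push_cast [List.length_cons]; omega
      have hgetk : update[k] = elm := by
        have := congrArg (fun l => l[0]?) hdrop
        simpa [List.getElem?_drop, List.getElem?_eq_getElem hk] using this
      have helm_mem : elm ∈ update.dropLast := by
        rw [List.dropLast_eq_take]
        exact List.mem_take_iff_getElem.2 ⟨k, by simp [List.length_cons] at hlen ⊢; omega, hgetk⟩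
      have hbound : ∀ j, (h : j < ra.length) → ra[j] = elm → j < rb.length := by
        intro j hj helm
        by_contra hge
        have : elm ∈ ra.drop rb.length := by
          rw [← helm]
          apply List.mem_iff_getElem.2
          exact ⟨j - rb.length, by simp [List.length_drop]; omega, by
            rw [List.getElem_drop]; congr 1; omega⟩
        exact hpre elm this helm_mem
      obtain ⟨vs, hsome, hmem⟩ := get_values_spec rb ra elm hbound
      have hslice : PySem.List.slice update (some (k : Int)) none = elm :: x :: rest' := by
        rw [PySem.List.slice_from_natCast, hdrop]
      rw [show pvGoA rb ra update (k : Int) (elm :: x :: rest') =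
          (if (update.length : Int) = (k : Int) + 1 then some (true, update)
          else
            match get_values rb (get_indices ra elm) with
            | none => none
            | some values =>
              let intersection : List Int :=
                PySem.Set.inter (PySem.Set.ofList values)
                  (PySem.Set.ofList (PySem.List.slice update (some (k : Int)) none))
              if intersection.length ≠ 0 then some (false, update)
              else pvGoA rb ra update ((k : Int) + 1) (x :: rest')) from rfl,
        if_neg hcond, hsome, hslice]
      simp only []
      have hiff : (PySem.Set.inter (PySem.Set.ofList vs) (PySem.Set.ofList (elm :: x :: rest'))).length ≠ 0 ↔
          pvViolB rb ra elm (elm :: x :: rest') = true := by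
        rw [pvViolB_iff]
        constructor
        · intro h
          obtain ⟨y, hy⟩ := List.exists_mem_of_length_pos (Nat.pos_of_ne_zero h)
          rw [PySem.Set.mem_inter, PySem.Set.mem_ofList, PySem.Set.mem_ofList] at hy
          exact ⟨y, (hmem y).1 hy.1, hy.2⟩
        · rintro ⟨b, hb, hbs⟩
          have : b ∈ PySem.Set.inter (PySem.Set.ofList vs) (PySem.Set.ofList (elm :: x :: rest')) := by
            rw [PySem.Set.mem_inter, PySem.Set.mem_ofList, PySem.Set.mem_ofList]
            exact ⟨(hmem b).2 hb, hbs⟩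
          intro hlen0
          rw [List.length_eq_zero_iff] at hlen0
          simp [hlen0] at this
      rw [pvHVb_cons rb ra elm (x :: rest') (List.cons_ne_nil _ _)]
      by_cases hv : pvViolB rb ra elm (elm :: x :: rest') = true
      · rw [if_pos (hiff.2 hv), hv]; rfl
      · have hv' : pvViolB rb ra elm (elm :: x :: rest') = false := Bool.eq_false_iff.mpr hv
        rw [if_neg (by rw [not_not]; by_contra hne; exact hv (hiff.1 hne))]
        have hdrop' : update.drop (k + 1) = x :: rest' := by
          rw [← List.tail_drop, hdrop]; rfl
        have := ih (k + 1) hdrop' (List.cons_ne_nil _ _)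
        rw [show ((k : Int) + 1) = ((k + 1 : Nat) : Int) by push_cast; ring, this, hv',
          Bool.false_or]

-- B-side: the backward loop as a boolean over the processed list and the current suffix set
def pvHVBb (before : PySem.Dict Int (PySem.Set Int)) : PySem.Set Int → List Int → Bool
  | _, [] => false
  | S, elm :: rest =>
    (!(before.getD elm PySem.Set.empty).isdisjoint (S.add elm)) || pvHVBb before (S.add elm) rest

theorem goB_spec (before : PySem.Dict Int (PySem.Set Int)) (update : List Int) :
    ∀ l S, pvGoB before update S l = some (!pvHVBb before S l, update) := by
  intro l
  induction l with
  | nil => intro S; rfl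
  | cons elm rest ih =>
    intro S
    simp only [pvGoB, pvHVBb]
    cases h : (before.getD elm PySem.Set.empty).isdisjoint (S.add elm) with
    | true => simp [ih]
    | false => simp

theorem mem_foldl_modify (b elm : Int) :
    ∀ (l : List (Int × Int)) (d : PySem.Dict Int (PySem.Set Int)),
      (b ∈ (l.foldl (fun d p => d.modify p.2 PySem.Set.empty (fun s => s.add p.1)) d).getD elm PySem.Set.empty
        ↔ b ∈ d.getD elm PySem.Set.empty ∨ (b, elm) ∈ l) := by
  intro l
  induction l with
  | nil => intro d; simp
  | cons p l ih =>
    intro d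
    simp only [List.foldl_cons, ih, PySem.Dict.getD_modify, List.mem_cons, Prod.ext_iff]
    by_cases h : elm = p.2
    · subst h
      simp [PySem.Set.mem_add]
      tauto
    · simp [h]

theorem mem_pvBefore (rb ra : List Int) (elm b : Int) :
    b ∈ (pvBefore rb ra).getD elm PySem.Set.empty ↔ (b, elm) ∈ rb.zip ra := by
  rw [pvBefore, mem_foldl_modify]
  simp [PySem.Dict.getD_empty, PySem.Set.empty]

theorem pvHVBb_append (before : PySem.Dict Int (PySem.Set Int)) :
    ∀ l1 l2 S, pvHVBb before S (l1 ++ l2) =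
      (pvHVBb before S l1 || pvHVBb before (PySem.Set.update S l1) l2) := by
  intro l1
  induction l1 with
  | nil => intro l2 S; rfl
  | cons e l1 ih =>
    intro l2 S
    simp only [List.cons_append, pvHVBb, ih, Bool.or_assoc]
    rfl

-- forward reading of B's backward pass
def pvHV2b (rb ra : List Int) : List Int → List Int → Bool
  | [], _ => false
  | elm :: front, suf => pvViolB rb ra elm (elm :: (front ++ suf)) || pvHV2b rb ra front suf

theorem head_check (rb ra : List Int) (elm : Int) (S : PySem.Set Int) (suf : List Int)
    (hS : ∀ b, b ∈ S ↔ b ∈ suf) :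
    (!((pvBefore rb ra).getD elm PySem.Set.empty).isdisjoint (S.add elm)) = pvViolB rb ra elm (elm :: suf) := by
  rw [Bool.eq_iff_iff, Bool.not_eq_true', Bool.eq_false_iff, Ne, PySem.Set.isdisjoint_iff, pvViolB_iff]
  push Not
  constructor
  · rintro ⟨b, hb, hmem⟩
    rw [PySem.Set.mem_add] at hmem
    refine ⟨b, (mem_pvBefore rb ra elm b).1 hb, ?_⟩
    rcases hmem with h | h
    · exact List.mem_cons_of_mem _ ((hS b).1 h)
    · simp [h]
  · rintro ⟨b, hb, hmem⟩
    refine ⟨b, (mem_pvBefore rb ra elm b).2 hb, ?_⟩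
    rw [PySem.Set.mem_add]
    rcases List.mem_cons.1 hmem with h | h
    · right; exact h
    · left; exact (hS b).2 h

theorem pvHVBb_reverse (rb ra : List Int) :
    ∀ front (S : PySem.Set Int) (suf : List Int), (∀ b, b ∈ S ↔ b ∈ suf) →
      pvHVBb (pvBefore rb ra) S front.reverse = pvHV2b rb ra front suf := by
  intro front
  induction front with
  | nil => intro S suf _; rfl
  | cons elm front ih =>
    intro S suf hS
    rw [List.reverse_cons, pvHVBb_append, ih S suf hS]
    have hup : ∀ b, b ∈ PySem.Set.update S front.reverse ↔ b ∈ front ++ suf := by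
      intro b
      rw [PySem.Set.mem_update, List.mem_append, List.mem_reverse, hS b]
      tauto
    show (pvHV2b rb ra front suf || (_ || false)) = pvHV2b rb ra (elm :: front) suf
    rw [Bool.or_false, head_check rb ra elm _ (front ++ suf) hup]
    show _ = (pvViolB rb ra elm (elm :: (front ++ suf)) || pvHV2b rb ra front suf)
    rw [Bool.or_comm]

theorem pvHVb_eq_pvHV2b (rb ra : List Int) :
    ∀ front z, pvHVb rb ra (front ++ [z]) = pvHV2b rb ra front [z] := by
  intro front
  induction front with
  | nil => intro z; rfl
  | cons e front ih =>
    intro z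
    rw [List.cons_append, pvHVb_cons rb ra e (front ++ [z]) (by simp), ih]
    rfl

-- ===== VERDICT (by name: the statement is the Claim_ definition above) =====
theorem is_valid_ticket_advanced_2_spec : Claim_equal_is_valid_ticket_advanced_2 := by
  intro rb ra update _hdom hpre
  unfold Spec_is_valid_ticket_advanced_2
  cases hup : update with
  | nil => rfl
  | cons u us =>
    have hne : update ≠ [] := by rw [hup]; exact List.cons_ne_nil _ _
    rw [← hup]
    have hA : is_valid_ticket_advanced_2 rb ra update = some (!pvHVb rb ra update, update) := by
      rw [is_valid_ticket_advanced_2, show (0 : Int) = ((0 : Nat) : Int) from rfl]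
      exact goA_spec rb ra update hpre update 0 List.drop_zero (by rw [hup]; exact List.cons_ne_nil _ _)
    have hB : is_valid_ticket_advanced_2_alt rb ra update =
        some (!pvHVBb (pvBefore rb ra) (PySem.Set.ofList [PySem.List.pyGetD update (-1) 0]) update.dropLast.reverse, update) := by
      rw [hup, is_valid_ticket_advanced_2_alt, ← hup]
      exact goB_spec _ _ _ _
    rw [hA, hB, PySem.List.pyGetD_neg_one update 0 hne,
      pvHVBb_reverse rb ra update.dropLast _ [update.getLast hne]
        (by intro b; rw [PySem.Set.mem_ofList]),
      ← pvHVb_eq_pvHV2b, List.dropLast_append_getLast hne]
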